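-- pv_equiv track=rewrite | github.com/EugeneSamokhval/LOIS_LR1 | main.py | machine_into_optimized
-- ===== SOURCE A (Python) =====
-- def machine_into_optimized(machine: str):
--     optimised = ''
--     for letter in machine:
--         if letter == "+":
--             optimised += '\\/'
--         elif letter == '*':
--             optimised += '/\\'
--         elif letter == '@':
--             optimised += '->'
--         elif letter == '=':
--             optimised += '~'
--         else:
--             optimised += letter
--     return optimised
-- ===== SOURCE B (Python) =====
-- def machine_into_optimized(machine: str):
--     return (machine.replace('+', '\\/')
--                    .replace('*', '/\\')
--                    .replace('@', '->')
--                    .replace('=', '~'))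
-- ===== Notes on version B (the rewrite author's own statement) =====
-- stated objective: idiomatic
-- what changed: Replaces the char-by-char loop with branching and per-character string concatenation by four independent whole-string str.replace passes; safe because no substitution output contains any source symbol.
import Mathlib
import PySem

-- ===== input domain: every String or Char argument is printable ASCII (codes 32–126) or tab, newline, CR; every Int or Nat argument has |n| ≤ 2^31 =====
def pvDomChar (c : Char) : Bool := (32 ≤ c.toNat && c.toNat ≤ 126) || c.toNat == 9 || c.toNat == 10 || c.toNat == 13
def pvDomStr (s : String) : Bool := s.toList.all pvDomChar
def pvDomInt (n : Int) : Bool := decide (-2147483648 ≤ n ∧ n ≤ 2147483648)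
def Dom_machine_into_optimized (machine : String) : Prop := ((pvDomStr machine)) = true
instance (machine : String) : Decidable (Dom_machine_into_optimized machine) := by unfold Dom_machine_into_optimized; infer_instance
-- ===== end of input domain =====

-- B replaces A's char-by-char loop with four independent whole-string replace passes (idiomatic; same result since no substitution output contains a source symbol).

-- ===== PORT A =====
-- char-by-char loop, accumulating into 'optimised'
def machine_into_optimized (machine : String) : String :=
  machine.toList.foldl (fun optimised letter =>
    if letter = '+' then optimised ++ "\\/"
    else if letter = '*' then optimised ++ "/\\"
    else if letter = '@' then optimised ++ "->"
    else if letter = '=' then optimised ++ "~"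
    else optimised.push letter) ""

-- ===== PORT B =====
-- four chained str.replace passes
def machine_into_optimized_alt (machine : String) : String :=
  PySem.Str.replace (PySem.Str.replace (PySem.Str.replace (PySem.Str.replace machine "+" "\\/") "*" "/\\") "@" "->") "=" "~"

-- ===== PRECONDITION & SPEC =====
def Spec_machine_into_optimized (machine : String) (out : String) : Prop := out = machine_into_optimized_alt machine
instance (machine : String) (out : String) : Decidable (Spec_machine_into_optimized machine out) := by unfold Spec_machine_into_optimized; infer_instance

-- ===== CLAIM (what is proved, stated in full; the proofs are below) =====
def Claim_equal_machine_into_optimized : Prop := ∀ (machine : String), Dom_machine_into_optimized machine → Spec_machine_into_optimized machine (machine_into_optimized machine)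

-- ===== LEMMAS AND PROOFS =====

-- the per-character substitution both programs realise
def pvSubst (c : Char) : List Char :=
  if c = '+' then ['\\', '/']
  else if c = '*' then ['/', '\\']
  else if c = '@' then ['-', '>']
  else if c = '=' then ['~']
  else [c]

def pvSub1 (o : Char) (new : List Char) (c : Char) : List Char :=
  if c = o then new else [c]

-- single-char replace.go computes a flatMap
theorem replace_go_single (o : Char) (new : List Char) (l acc : List Char) :
    PySem.Chars.replace.go [o] new l.length l acc
      = acc.reverse ++ l.flatMap (pvSub1 o new) := by
  induction l generalizing acc with
  | nil => simp [PySem.Chars.replace.go]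
  | cons c t ih =>
      rw [show (c :: t).length = t.length + 1 from rfl]
      rw [PySem.Chars.replace.go]
      have hpre : List.isPrefixOf [o] (c :: t) = (o == c) := by
        simp [List.isPrefixOf]
      by_cases h : c = o
      · subst h
        simp [hpre, ih, pvSub1]
      · have hne : (o == c) = false := by
          simp; exact fun hoc => absurd hoc.symm h
        simp [hpre, hne, ih, pvSub1, h]

theorem replace_single (o : Char) (new : List Char) (s : List Char) :
    PySem.Chars.replace s [o] new = s.flatMap (pvSub1 o new) := by
  rw [PySem.Chars.replace]
  simp [replace_go_single]

-- the A-side loop computes the same flatMap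
theorem foldlA (l : List Char) (acc : String) :
    (l.foldl (fun optimised letter =>
      if letter = '+' then optimised ++ "\\/"
      else if letter = '*' then optimised ++ "/\\"
      else if letter = '@' then optimised ++ "->"
      else if letter = '=' then optimised ++ "~"
      else optimised.push letter) acc).toList
    = acc.toList ++ l.flatMap pvSubst := by
  induction l generalizing acc with
  | nil => simp
  | cons c t ih =>
      simp only [List.foldl_cons, List.flatMap_cons]
      by_cases h1 : c = '+'
      · simp [h1, ih, pvSubst]
      · by_cases h2 : c = '*'
        · simp [h1, h2, ih, pvSubst]
        · by_cases h3 : c = '@'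
          · simp [h1, h2, h3, ih, pvSubst]
          · by_cases h4 : c = '='
            · simp [h1, h2, h3, h4, ih, pvSubst]
            · simp [h1, h2, h3, h4, ih, pvSubst]

-- flatMap composes
theorem flatMap_assoc {α : Type} (l : List α) (f g : α → List α) :
    (l.flatMap f).flatMap g = l.flatMap (fun c => (f c).flatMap g) := by
  induction l with
  | nil => simp
  | cons c t ih => simp [ih]

-- composing the four single-symbol substitutions gives pvSubst, pointwise
theorem pointwise (c : Char) :
    ((pvSub1 '+' ['\\','/'] c).flatMap (fun b =>
      (pvSub1 '*' ['/','\\'] b).flatMap (fun d =>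
        (pvSub1 '@' ['-','>'] d).flatMap (pvSub1 '=' ['~'])))) = pvSubst c := by
  by_cases h1 : c = '+'
  · simp [h1, pvSub1, pvSubst]
  · by_cases h2 : c = '*'
    · simp [h1, h2, pvSub1, pvSubst]
    · by_cases h3 : c = '@'
      · simp [h1, h2, h3, pvSub1, pvSubst]
      · by_cases h4 : c = '='
        · simp [h1, h2, h3, h4, pvSub1, pvSubst]
        · simp [h1, h2, h3, h4, pvSub1, pvSubst]

-- ===== VERDICT (by name: the statement is the Claim_ definition above) =====
theorem machine_into_optimized_spec : Claim_equal_machine_into_optimized := by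
  intro machine _
  unfold Spec_machine_into_optimized machine_into_optimized machine_into_optimized_alt
  have hB : (PySem.Str.replace (PySem.Str.replace (PySem.Str.replace (PySem.Str.replace machine "+" "\\/") "*" "/\\") "@" "->") "=" "~").toList
      = machine.toList.flatMap pvSubst := by
    simp only [PySem.Str.toList_replace]
    rw [show ("+" : String).toList = ['+'] from rfl, show ("\\/" : String).toList = ['\\','/'] from rfl,
        show ("*" : String).toList = ['*'] from rfl, show ("/\\" : String).toList = ['/','\\'] from rfl,
        show ("@" : String).toList = ['@'] from rfl, show ("->" : String).toList = ['-','>'] from rfl,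
        show ("=" : String).toList = ['='] from rfl, show ("~" : String).toList = ['~'] from rfl]
    rw [replace_single, replace_single, replace_single, replace_single,
        flatMap_assoc, flatMap_assoc, flatMap_assoc]
    exact List.flatMap_congr (fun c _ => pointwise c)
  have hA := foldlA machine.toList ""
  have : (machine.toList.foldl (fun optimised letter =>
      if letter = '+' then optimised ++ "\\/"
      else if letter = '*' then optimised ++ "/\\"
      else if letter = '@' then optimised ++ "->"
      else if letter = '=' then optimised ++ "~"
      else optimised.push letter) "").toList
      = (PySem.Str.replace (PySem.Str.replace (PySem.Str.replace (PySem.Str.replace machine "+" "\\/") "*" "/\\") "@" "->") "=" "~").toList := by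
    rw [hA, hB]; simp
  exact String.toList_injective this
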